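-- pv_equiv track=rewrite | github.com/pypi-data/pypi-mirror-233 | packages/pyreq-merger/pyreq-merger-0.0.1.tar.gz/pyreq-merger-0.0.1/src/pyreqmerger/merger.py | merge_downgrade
-- ===== SOURCE A (Python) =====
-- def merge_downgrade(first_req: dict, second_req: dict) -> dict:
--     new_req = {}
--
--     for key, value in first_req.items():
--         if key not in new_req:
--             new_req[key] = value
--
--         elif translate_to_int(new_req[key]) < translate_to_int(value):
--             new_req[key] = value
--
--     for key, value in second_req.items():
--         if key not in new_req:
--             new_req[key] = value
--
--         elif translate_to_int(new_req[key]) > translate_to_int(value):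
--             new_req[key] = value
--
--     return new_req
--
-- def translate_to_int(version: str) -> int:
--     return int("".join(version.split(".")))
-- ===== SOURCE B (Python) =====
-- def translate_to_int(version: str) -> int:
--     return int("".join(version.split(".")))
--
-- def merge_downgrade(first_req: dict, second_req: dict) -> dict:
--     merged = {**first_req, **second_req}
--     for key in merged:
--         if key in first_req and key in second_req:
--             merged[key] = min([first_req[key], second_req[key]], key=translate_to_int)
--     return merged
-- ===== Notes on version B (the rewrite author's own statement) =====
-- stated objective: simpler
-- what changed: Replaces A's two sequential copy/merge loops with conditional overwrites by a dict union {**first,**second} followed by a single fix-up pass that sets each shared key to min(first[k], second[k], key=translate_to_int).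
-- outside the precondition, e.g. on merge_downgrade({'a': 'x'}, {'a': 'y'}): A raises ValueError, B raises ValueError
import Mathlib
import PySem

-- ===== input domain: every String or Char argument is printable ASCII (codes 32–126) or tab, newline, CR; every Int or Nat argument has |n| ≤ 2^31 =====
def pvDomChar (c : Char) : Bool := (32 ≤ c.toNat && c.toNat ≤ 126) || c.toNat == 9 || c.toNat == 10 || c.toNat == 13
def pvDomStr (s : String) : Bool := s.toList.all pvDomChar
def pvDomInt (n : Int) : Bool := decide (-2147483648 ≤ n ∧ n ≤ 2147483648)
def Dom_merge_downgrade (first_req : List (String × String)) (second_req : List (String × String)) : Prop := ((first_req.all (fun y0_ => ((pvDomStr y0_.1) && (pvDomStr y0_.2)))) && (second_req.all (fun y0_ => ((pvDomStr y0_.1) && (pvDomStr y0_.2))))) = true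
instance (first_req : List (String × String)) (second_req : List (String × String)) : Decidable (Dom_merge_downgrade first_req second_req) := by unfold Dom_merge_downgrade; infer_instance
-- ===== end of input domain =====

-- B replaces A's copy-first-then-merge-second pair of loops by a dict union {**first, **second}
-- followed by a single fix-up pass that sets each SHARED key to min(first[k], second[k], key=translate_to_int).

-- shared helper: translate_to_int(version) = int("".join(version.split("."))); none = ValueError
def tr? (v : String) : Option Int :=
  PySem.Int.ofStr? (PySem.Str.join "" ((PySem.Str.split? v ".").getD []))

-- ===== PORT A =====
-- first loop body: key fresh → store; else downgrade-guard with '<' (keeps larger, per A's code)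
def mdStepA1 (od : Option (PySem.Dict String String)) (kv : String × String) : Option (PySem.Dict String String) :=
  od.bind fun d =>
    if d.contains kv.1 = false then some (d.insert kv.1 kv.2)
    else match tr? ((d.get? kv.1).getD ""), tr? kv.2 with
      | some a, some b => some (if a < b then d.insert kv.1 kv.2 else d)
      | _, _ => none

-- second loop body: key fresh → store; else keep the LOWER version ('>' replaces)
def mdStepA2 (od : Option (PySem.Dict String String)) (kv : String × String) : Option (PySem.Dict String String) :=
  od.bind fun d =>
    if d.contains kv.1 = false then some (d.insert kv.1 kv.2)
    else match tr? ((d.get? kv.1).getD ""), tr? kv.2 with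
      | some a, some b => some (if b < a then d.insert kv.1 kv.2 else d)
      | _, _ => none

def merge_downgrade (first_req : List (String × String)) (second_req : List (String × String)) : List (String × String) :=
  match second_req.foldl mdStepA2 (first_req.foldl mdStepA1 (some PySem.Dict.empty)) with
  | some d => d.items
  | none => []

-- ===== PORT B =====
-- fix-up step: shared key → min of the two originals by translate_to_int (first wins ties)
def mdStepB (d1 d2 : PySem.Dict String String) (om : Option (PySem.Dict String String)) (k : String) : Option (PySem.Dict String String) :=
  om.bind fun m =>
    if d1.contains k && d2.contains k then
      match tr? ((d1.get? k).getD ""), tr? ((d2.get? k).getD "") with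
      | some a, some b =>
          some (m.insert k (if b < a then (d2.get? k).getD "" else (d1.get? k).getD ""))
      | _, _ => none
    else some m

def merge_downgrade_alt (first_req : List (String × String)) (second_req : List (String × String)) : List (String × String) :=
  let d1 := PySem.Dict.ofList first_req
  let d2 := PySem.Dict.ofList second_req
  let merged := PySem.Dict.ofList (first_req ++ second_req)
  match merged.keys.foldl (mdStepB d1 d2) (some merged) with
  | some m => m.items
  | none => []

-- ===== PRECONDITION & SPEC =====
-- Pre_ excludes (a) association lists with duplicate keys, which are not dict representations
-- (the arguments are Python dicts), and (b) inputs where a SHARED key carries a version string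
-- translate_to_int cannot parse: there both A and B raise ValueError.
def Pre_merge_downgrade (first_req : List (String × String)) (second_req : List (String × String)) : Prop :=
  (first_req.map Prod.fst).Nodup ∧ (second_req.map Prod.fst).Nodup ∧
  ∀ p ∈ first_req ++ second_req,
    p.1 ∈ first_req.map Prod.fst → p.1 ∈ second_req.map Prod.fst → (tr? p.2).isSome
instance (first_req : List (String × String)) (second_req : List (String × String)) : Decidable (Pre_merge_downgrade first_req second_req) := by unfold Pre_merge_downgrade; infer_instance

def pvWitness_merge_downgrade : (List (String × String)) × (List (String × String)) :=
  ([("a", "1.2.0"), ("b", "zzz")], [("a", "1.10"), ("c", "0.1")])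

def Spec_merge_downgrade (first_req : List (String × String)) (second_req : List (String × String)) (out : List (String × String)) : Prop := out = merge_downgrade_alt first_req second_req
instance (first_req : List (String × String)) (second_req : List (String × String)) (out : List (String × String)) : Decidable (Spec_merge_downgrade first_req second_req out) := by unfold Spec_merge_downgrade; infer_instance

-- ===== CLAIM (what is proved, stated in full; the proofs are below) =====
def Claim_equal_merge_downgrade : Prop := ∀ (first_req : List (String × String)) (second_req : List (String × String)), Dom_merge_downgrade first_req second_req → Pre_merge_downgrade first_req second_req → Spec_merge_downgrade first_req second_req (merge_downgrade first_req second_req)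

-- ===== LEMMAS AND PROOFS =====

theorem loopA1_eq_update (f : List (String × String)) (d : PySem.Dict String String)
    (hn : (f.map Prod.fst).Nodup) (hfresh : ∀ p ∈ f, d.contains p.1 = false) :
    f.foldl mdStepA1 (some d) = some (d.update f) := by
  induction f generalizing d with
  | nil => rfl
  | cons p f ih =>
    simp only [List.map_cons, List.nodup_cons] at hn
    have hf := hfresh p (by simp)
    simp only [List.foldl_cons, mdStepA1, Option.bind_some, hf, if_true]
    rw [ih (d.insert p.1 p.2) hn.2]
    · rfl
    · intro q hq
      have hne : q.1 ≠ p.1 := fun h => hn.1 (h ▸ List.mem_map_of_mem hq)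
      rw [PySem.Dict.contains_insert]
      simp [hne, hfresh q (List.mem_cons_of_mem _ hq)]

theorem get?_update_nodup (s : List (String × String)) (d : PySem.Dict String String)
    (hs : (s.map Prod.fst).Nodup) (k : String) :
    (d.update s).get? k =
      match s.find? (fun p => p.1 == k) with
      | some pv => some pv.2
      | none => d.get? k := by
  induction s generalizing d with
  | nil => rfl
  | cons p s ih =>
    simp only [List.map_cons, List.nodup_cons] at hs
    have : d.update (p :: s) = (d.insert p.1 p.2).update s := rfl
    rw [this, ih _ hs.2, List.find?_cons]
    by_cases hk : p.1 = k
    · subst hk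
      have hnone : s.find? (fun q => q.1 == p.1) = none := by
        rw [List.find?_eq_none]
        intro q hq hbeq
        exact hs.1 ((beq_iff_eq.mp hbeq) ▸ List.mem_map_of_mem hq)
      simp [hnone, PySem.Dict.get?_insert_self]
    · have hbeq : (p.1 == k) = false := beq_eq_false_iff_ne.mpr hk
      simp only [hbeq]
      cases h : s.find? (fun q => q.1 == k) with
      | some pv => simp
      | none => simp [PySem.Dict.get?_insert_of_ne _ _ (Ne.symm hk)]

theorem loopA2_char (s : List (String × String)) (d : PySem.Dict String String)
    (hs : (s.map Prod.fst).Nodup) (hd : d.keys.Nodup)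
    (hok : ∀ p ∈ s, d.contains p.1 = true →
      (tr? ((d.get? p.1).getD "")).isSome ∧ (tr? p.2).isSome) :
    ∃ d', s.foldl mdStepA2 (some d) = some d' ∧
      d'.keys = PySem.Set.update d.keys (s.map Prod.fst) ∧ d'.keys.Nodup ∧
      ∀ k, d'.get? k =
        match s.find? (fun p => p.1 == k) with
        | some pv =>
            match d.get? k with
            | some w => some (if (tr? pv.2).getD 0 < (tr? w).getD 0 then pv.2 else w)
            | none => some pv.2
        | none => d.get? k := by
  induction s generalizing d with
  | nil => exact ⟨d, rfl, rfl, hd, fun k => rfl⟩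
  | cons p s ih =>
    simp only [List.map_cons, List.nodup_cons] at hs
    have hfindnone : s.find? (fun q => q.1 == p.1) = none := by
      rw [List.find?_eq_none]; intro q hq hbeq
      exact hs.1 ((beq_iff_eq.mp hbeq) ▸ List.mem_map_of_mem hq)
    by_cases hc : d.contains p.1 = false
    · -- fresh key: insert
      have hp1 : p.1 ∉ d.keys := fun h =>
        absurd ((PySem.Dict.contains_iff_mem_keys d p.1).mpr h) (by simp [hc])
      have hok' : ∀ q ∈ s, (d.insert p.1 p.2).contains q.1 = true →
          (tr? (((d.insert p.1 p.2).get? q.1).getD "")).isSome ∧ (tr? q.2).isSome := by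
        intro q hq hcq
        have hne : q.1 ≠ p.1 := by
          rintro h
          exact hs.1 (h ▸ List.mem_map_of_mem hq)
        rw [PySem.Dict.contains_insert] at hcq
        simp only [beq_eq_false_iff_ne.mpr hne, Bool.false_or] at hcq
        rw [PySem.Dict.get?_insert_of_ne _ _ hne]
        exact hok q (List.mem_cons_of_mem _ hq) hcq
      obtain ⟨d', h1, h2, h3, h4⟩ := ih (d.insert p.1 p.2) hs.2 (PySem.Dict.nodup_keys_insert _ _ _ hd) hok'
      refine ⟨d', ?_, ?_, h3, ?_⟩
      · simp only [List.foldl_cons, mdStepA2, Option.bind_some, hc, if_true]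
        exact h1
      · rw [h2, PySem.Dict.keys_insert_of_not_contains _ _ hc]
        have : d.keys ++ [p.1] = PySem.Set.add d.keys p.1 := by
          simp [PySem.Set.add, PySem.Set.contains, hp1]
        rw [this]; rfl
      · intro k
        rw [h4 k, List.find?_cons]
        by_cases hk : p.1 = k
        · subst hk
          have hdn : d.get? p.1 = none := (PySem.Dict.get?_eq_none_iff_contains d p.1).mpr hc
          simp [hfindnone, hdn, PySem.Dict.get?_insert_self]
        · have hbeq : (p.1 == k) = false := beq_eq_false_iff_ne.mpr hk
          rw [PySem.Dict.get?_insert_of_ne _ _ (Ne.symm hk)]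
          simp [hbeq]
    · -- existing key: compare
      simp only [Bool.not_eq_false] at hc
      obtain ⟨hw, hv⟩ := hok p (by simp) hc
      obtain ⟨w, hgw⟩ : ∃ w, d.get? p.1 = some w := by
        cases h : d.get? p.1 with
        | none => exact absurd ((PySem.Dict.get?_eq_none_iff_contains d p.1).mp h) (by simp [hc])
        | some w => exact ⟨w, rfl⟩
      obtain ⟨a, ha⟩ := Option.isSome_iff_exists.mp hw
      obtain ⟨b, hb⟩ := Option.isSome_iff_exists.mp hv
      have haw : tr? w = some a := by rw [hgw] at ha; simpa using ha
      set dn := if b < a then d.insert p.1 p.2 else d with hdn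
      have hstep : mdStepA2 (some d) p = some dn := by
        show (if d.contains p.1 = false then _ else _) = _
        rw [hc, if_neg (by simp), ha, hb]
      have hdnkeys : dn.keys = d.keys := by
        rw [hdn]; split
        · exact PySem.Dict.keys_insert_of_contains _ _ hc
        · rfl
      have hdnget_ne : ∀ k, k ≠ p.1 → dn.get? k = d.get? k := by
        intro k hk; rw [hdn]; split
        · exact PySem.Dict.get?_insert_of_ne _ _ hk
        · rfl
      have hdnget_self : dn.get? p.1 = some (if (tr? p.2).getD 0 < (tr? w).getD 0 then p.2 else w) := by
        rw [hdn, haw, hb]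
        simp only [Option.getD_some]
        split
        · exact PySem.Dict.get?_insert_self _ _ _
        · exact hgw
      have hcontn : ∀ k, dn.contains k = d.contains k := by
        intro k
        rw [hdn]; split
        · rw [PySem.Dict.contains_insert]
          by_cases h : k = p.1
          · simp [h, hc]
          · simp [beq_eq_false_iff_ne.mpr h]
        · rfl
      have hok' : ∀ q ∈ s, dn.contains q.1 = true →
          (tr? ((dn.get? q.1).getD "")).isSome ∧ (tr? q.2).isSome := by
        intro q hq hcq
        have hne : q.1 ≠ p.1 := fun h => hs.1 (h ▸ List.mem_map_of_mem hq)
        rw [hcontn] at hcq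
        rw [hdnget_ne q.1 hne]
        exact hok q (List.mem_cons_of_mem _ hq) hcq
      obtain ⟨d', h1, h2, h3, h4⟩ := ih dn hs.2 (hdnkeys ▸ hd) hok'
      refine ⟨d', ?_, ?_, h3, ?_⟩
      · rw [List.foldl_cons, hstep]; exact h1
      · rw [h2, hdnkeys]
        have hmem : p.1 ∈ d.keys := (PySem.Dict.contains_iff_mem_keys d p.1).mp hc
        have : PySem.Set.add d.keys p.1 = d.keys := by
          simp [PySem.Set.add, PySem.Set.contains, hmem]
        calc PySem.Set.update d.keys (s.map Prod.fst)
            = PySem.Set.update (PySem.Set.add d.keys p.1) (s.map Prod.fst) := by rw [this]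
          _ = PySem.Set.update d.keys (p.1 :: s.map Prod.fst) := rfl
      · intro k
        rw [h4 k, List.find?_cons]
        by_cases hk : p.1 = k
        · subst hk
          simp only [hfindnone, beq_self_eq_true, hgw]
          
          exact hdnget_self
        · have hbeq : (p.1 == k) = false := beq_eq_false_iff_ne.mpr hk
          rw [hdnget_ne k (Ne.symm hk)]
          simp [hbeq]

theorem loopB_char (d1 d2 : PySem.Dict String String) (K : List String)
    (m : PySem.Dict String String)
    (hok : ∀ k ∈ K, d1.contains k = true → d2.contains k = true →
      (tr? ((d1.get? k).getD "")).isSome ∧ (tr? ((d2.get? k).getD "")).isSome)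
    (hin : ∀ k ∈ K, m.contains k = true) :
    ∃ m', K.foldl (mdStepB d1 d2) (some m) = some m' ∧ m'.keys = m.keys ∧
      ∀ k, m'.get? k =
        if k ∈ K ∧ d1.contains k = true ∧ d2.contains k = true then
          some (if (tr? ((d2.get? k).getD "")).getD 0 < (tr? ((d1.get? k).getD "")).getD 0
                then (d2.get? k).getD "" else (d1.get? k).getD "")
        else m.get? k := by
  induction K generalizing m with
  | nil => exact ⟨m, rfl, rfl, fun k => by simp⟩
  | cons k0 K ih =>
    by_cases hsh : d1.contains k0 = true ∧ d2.contains k0 = true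
    · obtain ⟨hw, hv⟩ := hok k0 (by simp) hsh.1 hsh.2
      obtain ⟨a, ha⟩ := Option.isSome_iff_exists.mp hw
      obtain ⟨b, hb⟩ := Option.isSome_iff_exists.mp hv
      set v := if b < a then (d2.get? k0).getD "" else (d1.get? k0).getD "" with hvdef
      set m1 := m.insert k0 v with hm1
      have hstep : mdStepB d1 d2 (some m) k0 = some m1 := by
        show (if d1.contains k0 && d2.contains k0 then _ else _) = _
        rw [hsh.1, hsh.2, if_pos (by simp), ha, hb]
      have hm1keys : m1.keys = m.keys := PySem.Dict.keys_insert_of_contains _ _ (hin k0 (by simp))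
      have hm1cont : ∀ k, k ∈ K → m1.contains k = true := by
        intro k hk
        rw [hm1, PySem.Dict.contains_insert]
        simp [hin k (List.mem_cons_of_mem _ hk)]
      obtain ⟨m', h1, h2, h3⟩ := ih m1 (fun k hk => hok k (List.mem_cons_of_mem _ hk)) hm1cont
      refine ⟨m', ?_, by rw [h2, hm1keys], ?_⟩
      · rw [List.foldl_cons, hstep]; exact h1
      · intro k
        rw [h3 k]
        by_cases hk0 : k = k0
        · subst hk0
          have hR : k ∈ k :: K ∧ d1.contains k = true ∧ d2.contains k = true :=
            ⟨by simp, hsh.1, hsh.2⟩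
          by_cases hkK : k ∈ K
          · have hL : k ∈ K ∧ d1.contains k = true ∧ d2.contains k = true := ⟨hkK, hsh.1, hsh.2⟩
            rw [if_pos hL, if_pos hR]
          · have hnL : ¬ (k ∈ K ∧ d1.contains k = true ∧ d2.contains k = true) := fun h => hkK h.1
            rw [if_neg hnL, if_pos hR, hm1, PySem.Dict.get?_insert_self, hvdef, ha, hb]
            simp
        · have hm1get : m1.get? k = m.get? k := PySem.Dict.get?_insert_of_ne _ _ hk0
          by_cases hc : k ∈ K ∧ d1.contains k = true ∧ d2.contains k = true
          · have hR2 : k ∈ k0 :: K ∧ d1.contains k = true ∧ d2.contains k = true :=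
              ⟨List.mem_cons_of_mem _ hc.1, hc.2⟩
            rw [if_pos hc, if_pos hR2]
          · rw [if_neg hc, hm1get, if_neg ?_]
            rintro ⟨hmem, hd⟩
            rcases List.mem_cons.mp hmem with h | h
            · exact hk0 h
            · exact hc ⟨h, hd⟩
    · have hstep : mdStepB d1 d2 (some m) k0 = some m := by
        show (if d1.contains k0 && d2.contains k0 then _ else _) = _
        rw [if_neg (by intro h; exact hsh (by simpa using h))]
      obtain ⟨m', h1, h2, h3⟩ := ih m (fun k hk => hok k (List.mem_cons_of_mem _ hk))
        (fun k hk => hin k (List.mem_cons_of_mem _ hk))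
      refine ⟨m', ?_, h2, ?_⟩
      · rw [List.foldl_cons, hstep]; exact h1
      · intro k
        rw [h3 k]
        by_cases hc : k ∈ K ∧ d1.contains k = true ∧ d2.contains k = true
        · have hR2 : k ∈ k0 :: K ∧ d1.contains k = true ∧ d2.contains k = true :=
            ⟨List.mem_cons_of_mem _ hc.1, hc.2⟩
          rw [if_pos hc, if_pos hR2]
        · rw [if_neg hc, if_neg ?_]
          rintro ⟨hmem, hd⟩
          rcases List.mem_cons.mp hmem with h | h
          · exact hsh (h ▸ hd)
          · exact hc ⟨h, hd⟩


-- items / keys of Dict.ofList on a duplicate-free association list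
theorem items_ofList_nodup (f : List (String × String)) (hn : (f.map Prod.fst).Nodup) :
    (PySem.Dict.ofList f).items = f := by
  show (List.foldl (fun acc p => acc.insert p.1 p.2) PySem.Dict.empty f).items = f
  rw [PySem.Dict.items_foldl_insert_fresh f Prod.fst Prod.snd _ (fun a _ => PySem.Dict.contains_empty _) hn]
  simp [PySem.Dict.empty]

-- ===== VERDICT (by name: the statement is the Claim_ definition above) =====
theorem merge_downgrade_spec : Claim_equal_merge_downgrade := by
  intro f s _hdom hpre
  obtain ⟨hn1, hn2, h3⟩ := hpre
  unfold Spec_merge_downgrade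
  set d1 := PySem.Dict.ofList f with hd1def
  set d2 := PySem.Dict.ofList s with hd2def
  set merged := PySem.Dict.ofList (f ++ s) with hmgdef
  -- basic lookup characterisations
  have hitems1 : d1.items = f := items_ofList_nodup f hn1
  have hitems2 : d2.items = s := items_ofList_nodup s hn2
  have hkeys1 : d1.keys = f.map Prod.fst := by
    show d1.items.map (fun x => x.1) = _
    rw [hitems1]
  have hnk1 : d1.keys.Nodup := by rw [hkeys1]; exact hn1
  have hg1 : ∀ k, d1.get? k = (f.find? (fun p => p.1 == k)).map (fun x => x.2) := by
    intro k
    show (d1.items.find? (fun p => p.1 == k)).map (fun x => x.2) = _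
    rw [hitems1]
  have hg2 : ∀ k, d2.get? k = (s.find? (fun p => p.1 == k)).map (fun x => x.2) := by
    intro k
    show (d2.items.find? (fun p => p.1 == k)).map (fun x => x.2) = _
    rw [hitems2]
  have hmg : merged = d1.update s := by
    show List.foldl (fun acc p => acc.insert p.1 p.2) PySem.Dict.empty (f ++ s) =
      List.foldl (fun acc p => acc.insert p.1 p.2)
        (List.foldl (fun acc p => acc.insert p.1 p.2) PySem.Dict.empty f) s
    exact List.foldl_append
  have hgm : ∀ k, merged.get? k =
      match s.find? (fun p => p.1 == k) with
      | some pv => some pv.2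
      | none => d1.get? k := by
    intro k
    rw [hmg]
    exact get?_update_nodup s d1 hn2 k
  have hnkm : merged.keys.Nodup := by
    rw [hmg]
    exact PySem.Dict.nodup_keys_update d1 s hnk1
  -- memberships behind a successful find?
  have hfindf : ∀ (k : String) q, f.find? (fun p => p.1 == k) = some q →
      q ∈ f ∧ q.1 = k := by
    intro k q h
    refine ⟨List.mem_of_find?_eq_some h, ?_⟩
    have hb := List.find?_some h
    exact beq_iff_eq.mp hb
  have hfinds : ∀ (k : String) q, s.find? (fun p => p.1 == k) = some q →
      q ∈ s ∧ q.1 = k := by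
    intro k q h
    refine ⟨List.mem_of_find?_eq_some h, ?_⟩
    have hb := List.find?_some h
    exact beq_iff_eq.mp hb
  -- A's first loop stores first_req verbatim
  have hA1 : f.foldl mdStepA1 (some PySem.Dict.empty) = some d1 :=
    loopA1_eq_update f PySem.Dict.empty hn1 (fun p _ => PySem.Dict.contains_empty _)
  -- A's second loop
  have hokA : ∀ p ∈ s, d1.contains p.1 = true →
      (tr? ((d1.get? p.1).getD "")).isSome ∧ (tr? p.2).isSome := by
    intro p hp hc
    rw [PySem.Dict.contains_eq_isSome_get?, hg1] at hc
    obtain ⟨q, hq⟩ : ∃ q, f.find? (fun r => r.1 == p.1) = some q := by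
      cases h : f.find? (fun r => r.1 == p.1) with
      | none => rw [h] at hc; simp at hc
      | some q => exact ⟨q, rfl⟩
    obtain ⟨hqf, hqk⟩ := hfindf _ _ hq
    have hmemf : p.1 ∈ f.map Prod.fst := hqk ▸ List.mem_map_of_mem hqf
    have hmems : p.1 ∈ s.map Prod.fst := List.mem_map_of_mem hp
    constructor
    · rw [hg1, hq]
      exact h3 q (List.mem_append_left _ hqf) (hqk ▸ hmemf) (hqk ▸ hmems)
    · exact h3 p (List.mem_append_right _ hp) hmemf hmems
  obtain ⟨dA, hA2, hAkeys, hAnodup, hAget⟩ := loopA2_char s d1 hn2 hnk1 hokA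
  -- B's fix-up loop
  have hokB : ∀ k ∈ merged.keys, d1.contains k = true → d2.contains k = true →
      (tr? ((d1.get? k).getD "")).isSome ∧ (tr? ((d2.get? k).getD "")).isSome := by
    intro k _ hc1 hc2
    rw [PySem.Dict.contains_eq_isSome_get?, hg1] at hc1
    rw [PySem.Dict.contains_eq_isSome_get?, hg2] at hc2
    obtain ⟨q, hq⟩ : ∃ q, f.find? (fun r => r.1 == k) = some q := by
      cases h : f.find? (fun r => r.1 == k) with
      | none => rw [h] at hc1; simp at hc1
      | some q => exact ⟨q, rfl⟩
    obtain ⟨pv, hpv⟩ : ∃ pv, s.find? (fun r => r.1 == k) = some pv := by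
      cases h : s.find? (fun r => r.1 == k) with
      | none => rw [h] at hc2; simp at hc2
      | some pv => exact ⟨pv, rfl⟩
    obtain ⟨hqf, hqk⟩ := hfindf _ _ hq
    obtain ⟨hpvs, hpvk⟩ := hfinds _ _ hpv
    have hmemf : k ∈ f.map Prod.fst := hqk ▸ List.mem_map_of_mem hqf
    have hmems : k ∈ s.map Prod.fst := hpvk ▸ List.mem_map_of_mem hpvs
    constructor
    · rw [hg1, hq]
      exact h3 q (List.mem_append_left _ hqf) (hqk ▸ hmemf) (hqk ▸ hmems)
    · rw [hg2, hpv]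
      exact h3 pv (List.mem_append_right _ hpvs) (hpvk ▸ hmemf) (hpvk ▸ hmems)
  obtain ⟨mB, hB1, hBkeys, hBget⟩ := loopB_char d1 d2 merged.keys merged hokB
    (fun k hk => (PySem.Dict.contains_iff_mem_keys merged k).mpr hk)
  -- the two results
  have hL : merge_downgrade f s = dA.items := by
    unfold merge_downgrade
    rw [hA1, hA2]
  have hR : merge_downgrade_alt f s = mB.items := by
    show (match List.foldl (mdStepB d1 d2) (some merged) merged.keys with
          | some m => m.items
          | none => []) = mB.items
    rw [hB1]
  rw [hL, hR]
  -- identical key lists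
  have hkeyseq : dA.keys = mB.keys := by
    rw [hAkeys, hBkeys, hkeys1, hmg]
    show _ = (PySem.Dict.update d1 s).keys
    unfold PySem.Dict.update
    rw [PySem.Dict.keys_foldl_insert_key s Prod.fst (fun d x => x.2), hkeys1]
  have hBnodup : mB.keys.Nodup := by rw [hBkeys]; exact hnkm
  -- identical lookups
  have hgeteq : ∀ k, dA.get? k = mB.get? k := by
    intro k
    rw [hAget k, hBget k, hgm k]
    cases hFs : s.find? (fun p => p.1 == k) with
    | none =>
      cases hFf : f.find? (fun p => p.1 == k) with
      | none =>
        have hc1 : d1.contains k = false := by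
          rw [PySem.Dict.contains_eq_isSome_get?, hg1, hFf]; rfl
        rw [if_neg (by rintro ⟨_, h, _⟩; rw [hc1] at h; cases h)]
      | some q =>
        have hc2 : d2.contains k = false := by
          rw [PySem.Dict.contains_eq_isSome_get?, hg2, hFs]; rfl
        rw [if_neg (by rintro ⟨_, _, h⟩; rw [hc2] at h; cases h)]
    | some pv =>
      cases hFf : f.find? (fun p => p.1 == k) with
      | none =>
        have hc1 : d1.contains k = false := by
          rw [PySem.Dict.contains_eq_isSome_get?, hg1, hFf]; rfl
        have hd1n : d1.get? k = none := by rw [hg1, hFf]; rfl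
        rw [hd1n, if_neg (by rintro ⟨_, h, _⟩; rw [hc1] at h; cases h)]
      | some q =>
        have hd1g : d1.get? k = some q.2 := by rw [hg1, hFf]; rfl
        have hd2g : d2.get? k = some pv.2 := by rw [hg2, hFs]; rfl
        have hc1 : d1.contains k = true := by
          rw [PySem.Dict.contains_eq_isSome_get?, hd1g]; rfl
        have hc2 : d2.contains k = true := by
          rw [PySem.Dict.contains_eq_isSome_get?, hd2g]; rfl
        have hmk : k ∈ merged.keys := by
          apply (PySem.Dict.contains_iff_mem_keys merged k).mp
          rw [PySem.Dict.contains_eq_isSome_get?, hgm k, hFs]; rfl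
        rw [hd1g, if_pos ⟨hmk, hc1, hc2⟩, hd2g]
        simp
  -- conclude on items
  rw [PySem.Dict.items_eq_map_keys dA hAnodup "", PySem.Dict.items_eq_map_keys mB hBnodup "", hkeyseq]
  apply List.map_congr_left
  intro k _
  rw [PySem.Dict.getD_eq_get?_getD, PySem.Dict.getD_eq_get?_getD, hgeteq k]
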